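-- pv_equiv track=rewrite | github.com/JCRaymond/Google_Code_Jams | (PCJ3) Bribe_the_Prisoners/Methods.py | get_min_costs_between_cells
-- ===== SOURCE A (Python) =====
-- def cache(f):
--     cache = {}
--
--     def newfunc(*args):
--         if cache.get(args) == None:
--             cache[args] = f(*args)
--         return cache[args]
--
--     return newfunc
--
-- def get_min_costs_between_cells(c1, c2, cells):
--     def calc_min_cost(a, b):
--         cost = 0
--         for cell in cells:
--             if cell >= a and cell <= b:
--                 temp = b-a + calc_min_cost(a, cell-1) + calc_min_cost(cell+1, b)
--                 if not cost or temp<cost: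
--                     cost = temp
--         return cost
--     calc_min_cost = cache(calc_min_cost)
--
--     return calc_min_cost(c1,c2)
-- ===== SOURCE B (Python) =====
-- def get_min_costs_between_cells(c1, c2, cells):
--     # Bottom-up interval DP over the sorted distinct cells in [c1, c2],
--     # using a fence array F = [c1-1] + cells + [c2+1]; dp[(i,j)] is the
--     # minimal cost to free the cells between fences F[i-1] and F[j+1].
--     S = sorted(set(c for c in cells if c1 <= c <= c2))
--     k = len(S)
--     F = [c1 - 1] + S + [c2 + 1]
--     dp = {}
--     for length in range(1, k + 1):
--         for i in range(1, k - length + 2):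
--             j = i + length - 1
--             width = F[j + 1] - F[i - 1] - 2
--             best = None
--             for m in range(i, j + 1):
--                 v = width + dp.get((i, m - 1), 0) + dp.get((m + 1, j), 0)
--                 if best is None or v < best:
--                     best = v
--             dp[(i, j)] = best
--     return dp.get((1, k), 0)
-- ===== Notes on version B (the rewrite author's own statement) =====
-- stated objective: alternative
-- what changed: Replaced the memoized top-down recursion that rescans the whole cell list at every subinterval by a bottom-up interval-DP table over the sorted distinct in-range cells (fence array F = [c1-1] + sorted(set(cells in range)) + [c2+1]), filled by increasing range length.
import Mathlib
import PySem

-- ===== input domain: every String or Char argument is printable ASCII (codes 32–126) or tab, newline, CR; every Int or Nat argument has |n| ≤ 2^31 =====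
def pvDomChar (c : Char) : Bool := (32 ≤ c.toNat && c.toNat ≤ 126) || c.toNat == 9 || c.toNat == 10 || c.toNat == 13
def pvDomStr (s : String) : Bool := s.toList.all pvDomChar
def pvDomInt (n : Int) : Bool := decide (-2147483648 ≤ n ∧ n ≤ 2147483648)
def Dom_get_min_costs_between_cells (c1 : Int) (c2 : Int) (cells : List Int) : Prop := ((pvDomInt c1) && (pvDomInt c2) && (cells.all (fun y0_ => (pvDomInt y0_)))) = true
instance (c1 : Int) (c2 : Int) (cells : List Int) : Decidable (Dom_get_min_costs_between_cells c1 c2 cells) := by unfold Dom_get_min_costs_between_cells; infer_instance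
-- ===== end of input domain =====

-- B replaces A's memoized top-down recursion (which rescans the whole cell list at
-- every subinterval) by a bottom-up interval-DP table over the sorted distinct
-- in-range cells, filled by increasing range length (objective: alternative).

-- ===== PORT A =====
-- A's `calc_min_cost(a, b)` with its cells-scanning for-loop as a foldl; the memo
-- cache only caches a pure function, so the port is the plain recursion, made
-- structural with a fuel argument that strictly exceeds the interval width
-- (fuel = (b - a + 2).toNat suffices for every recursive call, so the 0-fuel
-- branch is never reached; pvF_fuel_irrel below proves fuel-irrelevance).
def pvCalcMinF : Nat → List Int → Int → Int → Int
  | 0, _, _, _ => 0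
  | fuel + 1, cells, a, b =>
    cells.foldl (fun cost c =>
      if c ≥ a ∧ c ≤ b then
        let temp := b - a + pvCalcMinF fuel cells a (c - 1) + pvCalcMinF fuel cells (c + 1) b
        if cost = 0 ∨ temp < cost then temp else cost
      else cost) 0

def get_min_costs_between_cells (c1 : Int) (c2 : Int) (cells : List Int) : Int :=
  pvCalcMinF (c2 - c1 + 2).toNat cells c1 c2

-- ===== PORT B =====
-- `dp[(i,j)] = best` always stores a non-None `best` (the inner range i..j is
-- never empty), so `best.getD 0` is exact on every reachable state.
def get_min_costs_between_cells_alt (c1 : Int) (c2 : Int) (cells : List Int) : Int :=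
  let S := PySem.List.sorted (PySem.Set.ofList (cells.filter (fun c => decide (c1 ≤ c ∧ c ≤ c2)))) (fun x => x) false
  let k : Int := (S.length : Int)
  let F : List Int := (c1 - 1) :: S ++ [c2 + 1]
  let dp : PySem.Dict (Int × Int) Int :=
    (PySem.List.pyRange 1 (k + 1) 1).foldl (fun dp length =>
      (PySem.List.pyRange 1 (k - length + 2) 1).foldl (fun dp i =>
        let j := i + length - 1
        let width := PySem.List.pyGetD F (j + 1) 0 - PySem.List.pyGetD F (i - 1) 0 - 2
        let best : Option Int := (PySem.List.pyRange i (j + 1) 1).foldl (fun best m =>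
          let v := width + dp.getD (i, m - 1) 0 + dp.getD (m + 1, j) 0
          match best with
          | none => some v
          | some b => if v < b then some v else some b) none
        dp.insert (i, j) (best.getD 0)) dp) PySem.Dict.empty
  dp.getD (1, k) 0

-- ===== PRECONDITION & SPEC =====
def Spec_get_min_costs_between_cells (c1 : Int) (c2 : Int) (cells : List Int) (out : Int) : Prop := out = get_min_costs_between_cells_alt c1 c2 cells
instance (c1 : Int) (c2 : Int) (cells : List Int) (out : Int) : Decidable (Spec_get_min_costs_between_cells c1 c2 cells out) := by unfold Spec_get_min_costs_between_cells; infer_instance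

-- ===== CLAIM (what is proved, stated in full; the proofs are below) =====
def Claim_equal_get_min_costs_between_cells : Prop := ∀ (c1 : Int) (c2 : Int) (cells : List Int), Dom_get_min_costs_between_cells c1 c2 cells → Spec_get_min_costs_between_cells c1 c2 cells (get_min_costs_between_cells c1 c2 cells)

-- ===== LEMMAS AND PROOFS =====

def pvM (cells : List Int) (a b : Int) : Int := pvCalcMinF (b - a + 2).toNat cells a b

def pvG (cells : List Int) (a b c : Int) : Int :=
  b - a + pvM cells a (c - 1) + pvM cells (c + 1) b

def pvSent (l : List Int) (cost : Int) : Int :=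
  l.foldl (fun cost t => if cost = 0 ∨ t < cost then t else cost) cost

def pvStep (b : Option Int) (w : Int) : Option Int :=
  match b with
  | none => some w
  | some b0 => if w < b0 then some w else some b0

def pvOmin (l : List Int) : Option Int := l.foldl pvStep none

theorem pvLoopF (cells : List Int) (f : Nat) (a b : Int) (l : List Int) (cost : Int) :
    l.foldl (fun cost c =>
        if c ≥ a ∧ c ≤ b then
          let temp := b - a + pvCalcMinF f cells a (c - 1) + pvCalcMinF f cells (c + 1) b
          if cost = 0 ∨ temp < cost then temp else cost
        else cost) cost
      = pvSent ((l.filter (fun c => decide (c ≥ a ∧ c ≤ b))).map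
          (fun c => b - a + pvCalcMinF f cells a (c - 1) + pvCalcMinF f cells (c + 1) b)) cost := by
  induction l generalizing cost with
  | nil => rfl
  | cons c rest ih =>
    by_cases h : c ≥ a ∧ c ≤ b
    · simp only [List.foldl_cons, if_pos h, List.filter_cons, h]
      rw [ih]; rfl
    · simp only [List.foldl_cons, List.filter_cons, h, decide_false, Bool.false_eq_true, if_false]
      rw [ih]

theorem pvCalcMinF_succ (cells : List Int) (f : Nat) (a b : Int) :
    pvCalcMinF (f + 1) cells a b
      = pvSent ((cells.filter (fun c => decide (c ≥ a ∧ c ≤ b))).map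
          (fun c => b - a + pvCalcMinF f cells a (c - 1) + pvCalcMinF f cells (c + 1) b)) 0 := by
  rw [pvCalcMinF, pvLoopF]

theorem pvSent_nonneg (l : List Int) (cost : Int) (hl : ∀ t ∈ l, 0 ≤ t) (hc : 0 ≤ cost) :
    0 ≤ pvSent l cost := by
  induction l generalizing cost with
  | nil => simpa [pvSent] using hc
  | cons t rest ih =>
    have ht : 0 ≤ t := hl t (by simp)
    show 0 ≤ pvSent rest (if cost = 0 ∨ t < cost then t else cost)
    exact ih _ (fun x hx => hl x (by simp [hx])) (by split_ifs <;> assumption)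

theorem pvCalcMinF_nonneg (f : Nat) (cells : List Int) (a b : Int) :
    0 ≤ pvCalcMinF f cells a b := by
  induction f generalizing a b with
  | zero => exact le_rfl
  | succ f ih =>
    rw [pvCalcMinF_succ]
    apply pvSent_nonneg _ _ _ le_rfl
    intro t ht
    simp only [List.mem_map, List.mem_filter, decide_eq_true_eq] at ht
    obtain ⟨c, ⟨_, hac, hcb⟩, rfl⟩ := ht
    have h1 := ih a (c - 1)
    have h2 := ih (c + 1) b
    omega

theorem pvF_fuel_irrel (cells : List Int) (t : Nat) :
    ∀ (a b : Int) (n m : Nat), (b - a + 2).toNat ≤ t → (b - a + 2).toNat ≤ n →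
      (b - a + 2).toNat ≤ m → pvCalcMinF n cells a b = pvCalcMinF m cells a b := by
  induction t with
  | zero =>
    intro a b n m ht hn hm
    have hb : b < a := by omega
    have hfil : cells.filter (fun c => decide (c ≥ a ∧ c ≤ b)) = [] := by
      apply List.filter_eq_nil_iff.mpr
      intro x _ hdec
      have := of_decide_eq_true hdec; omega
    cases n with
    | zero =>
      cases m with
      | zero => rfl
      | succ m => rw [pvCalcMinF_succ, hfil]; rfl
    | succ n =>
      cases m with
      | zero => rw [pvCalcMinF_succ, hfil]; rfl
      | succ m => rw [pvCalcMinF_succ, pvCalcMinF_succ, hfil]; rfl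
  | succ t ih =>
    intro a b n m ht hn hm
    by_cases hb : b < a
    · have hfil : cells.filter (fun c => decide (c ≥ a ∧ c ≤ b)) = [] := by
        apply List.filter_eq_nil_iff.mpr
        intro x _ hdec
        have := of_decide_eq_true hdec; omega
      cases n with
      | zero =>
        cases m with
        | zero => rfl
        | succ m => rw [pvCalcMinF_succ, hfil]; rfl
      | succ n =>
        cases m with
        | zero => rw [pvCalcMinF_succ, hfil]; rfl
        | succ m => rw [pvCalcMinF_succ, pvCalcMinF_succ, hfil]; rfl
    · have hab : a ≤ b := by omega
      obtain ⟨n', rfl⟩ : ∃ n', n = n' + 1 := ⟨n - 1, by omega⟩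
      obtain ⟨m', rfl⟩ : ∃ m', m = m' + 1 := ⟨m - 1, by omega⟩
      rw [pvCalcMinF_succ, pvCalcMinF_succ]
      congr 1
      apply List.map_congr_left
      intro c hc
      have hc' := List.mem_filter.mp hc
      have hcr := of_decide_eq_true hc'.2
      have e1 : pvCalcMinF n' cells a (c - 1) = pvCalcMinF m' cells a (c - 1) :=
        ih a (c - 1) n' m' (by omega) (by omega) (by omega)
      have e2 : pvCalcMinF n' cells (c + 1) b = pvCalcMinF m' cells (c + 1) b :=
        ih (c + 1) b n' m' (by omega) (by omega) (by omega)
      rw [e1, e2]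

theorem pvM_nonneg (cells : List Int) (a b : Int) : 0 ≤ pvM cells a b :=
  pvCalcMinF_nonneg _ cells a b

theorem pvM_empty (cells : List Int) (a b : Int)
    (hfil : cells.filter (fun c => decide (c ≥ a ∧ c ≤ b)) = []) : pvM cells a b = 0 := by
  rw [pvM]
  cases hn : (b - a + 2).toNat with
  | zero => rfl
  | succ f => rw [pvCalcMinF_succ, hfil]; rfl

theorem pvFoldl_step_some (l : List Int) (b : Int) :
    l.foldl pvStep (some b) = some (l.foldl min b) := by
  induction l generalizing b with
  | nil => rfl
  | cons t rest ih =>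
    show rest.foldl pvStep (pvStep (some b) t) = some (rest.foldl min (min b t))
    have h : pvStep (some b) t = some (min b t) := by
      simp only [pvStep, Int.min_def]
      split_ifs with h1 h2 <;> first | rfl | (exfalso; omega)
    rw [h, ih]

theorem pvOmin_cons (x : Int) (t : List Int) : pvOmin (x :: t) = some (t.foldl min x) := by
  show t.foldl pvStep (pvStep none x) = _
  exact pvFoldl_step_some t x

theorem pvOmin_some_iff (l : List Int) (x : Int) :
    pvOmin l = some x ↔ x ∈ l ∧ ∀ y ∈ l, x ≤ y := by
  cases l with
  | nil => simp [pvOmin]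
  | cons h t =>
    rw [pvOmin_cons]
    constructor
    · rintro hx
      have hx' : t.foldl min h = x := by simpa using hx
      subst hx'
      refine ⟨?_, ?_⟩
      · rcases PySem.List.foldl_min_mem t h with h1 | h1
        · rw [h1]; simp
        · exact List.mem_cons_of_mem _ h1
      · intro y hy
        rcases List.mem_cons.mp hy with rfl | hy'
        · exact (PySem.List.foldl_min_le t y).1
        · exact (PySem.List.foldl_min_le t h).2 y hy'
    · rintro ⟨hmem, hle⟩
      have h1 : t.foldl min h ≤ x := by
        rcases List.mem_cons.mp hmem with rfl | hx'
        · exact (PySem.List.foldl_min_le t x).1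
        · exact (PySem.List.foldl_min_le t h).2 x hx'
      have h2 : x ≤ t.foldl min h := by
        rcases PySem.List.foldl_min_mem t h with he | he
        · rw [he]; exact hle h (by simp)
        · exact hle _ (List.mem_cons_of_mem _ he)
      have : t.foldl min h = x := le_antisymm h1 h2
      rw [this]

theorem pvOmin_congr (l l' : List Int) (h : ∀ x, x ∈ l ↔ x ∈ l') : pvOmin l = pvOmin l' := by
  cases hl : pvOmin l with
  | none =>
    have : l = [] := by
      cases l with
      | nil => rfl
      | cons a t => rw [pvOmin_cons] at hl; cases hl
    subst this
    have : l' = [] := List.eq_nil_iff_forall_not_mem.mpr (fun x hx => by simp [← h x] at hx)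
    subst this; rfl
  | some x =>
    obtain ⟨hmem, hle⟩ := (pvOmin_some_iff l x).mp hl
    exact ((pvOmin_some_iff l' x).mpr ⟨(h x).mp hmem, fun y hy => hle y ((h y).mpr hy)⟩).symm

theorem pvSent_pos_eq_foldl_min (l : List Int) : ∀ (c : Int), 0 < c → (∀ t ∈ l, 0 < t) →
    pvSent l c = l.foldl min c := by
  induction l with
  | nil => intro c _ _; rfl
  | cons u r ih =>
    intro c hc hl
    show pvSent r (if c = 0 ∨ u < c then u else c) = r.foldl min (min c u)
    have hu : 0 < u := hl u (by simp)
    have : (if c = 0 ∨ u < c then u else c) = min c u := by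
      rw [Int.min_def]; split_ifs <;> omega
    rw [this]
    exact ih _ (lt_min hc hu) (fun x hx => hl x (by simp [hx]))

theorem pvSent_min_pos (l : List Int) (hl : ∀ t ∈ l, 0 < t) :
    pvSent l 0 = (pvOmin l).getD 0 := by
  cases l with
  | nil => rfl
  | cons t rest =>
    have ht : 0 < t := hl t (by simp)
    have step1 : pvSent (t :: rest) 0 = pvSent rest t := by
      show pvSent rest (if (0:Int) = 0 ∨ t < 0 then t else 0) = _
      rw [if_pos (Or.inl rfl)]
    rw [step1, pvOmin_cons]
    exact pvSent_pos_eq_foldl_min rest t ht (fun x hx => hl x (by simp [hx]))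

theorem pvMchar (cells : List Int) (a b : Int) :
    pvM cells a b
      = (pvOmin ((cells.filter (fun c => decide (c ≥ a ∧ c ≤ b))).map (pvG cells a b))).getD 0 := by
  by_cases hemp : cells.filter (fun c => decide (c ≥ a ∧ c ≤ b)) = []
  · rw [pvM_empty cells a b hemp, hemp]; rfl
  · obtain ⟨c0, hc0⟩ := List.exists_mem_of_ne_nil _ hemp
    have hc0' := List.mem_filter.mp hc0
    have hab : a ≤ b := by
      have := of_decide_eq_true hc0'.2; omega
    have hfl : (b - a + 2).toNat = (b - a + 1).toNat + 1 := by omega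
    have hunf : pvM cells a b
        = pvSent ((cells.filter (fun c => decide (c ≥ a ∧ c ≤ b))).map (pvG cells a b)) 0 := by
      rw [pvM, hfl, pvCalcMinF_succ]
      congr 1
      apply List.map_congr_left
      intro c hc
      have hc' := List.mem_filter.mp hc
      have hcr := of_decide_eq_true hc'.2
      have e1 : pvCalcMinF (b - a + 1).toNat cells a (c - 1) = pvM cells a (c - 1) := by
        rw [pvM]
        exact pvF_fuel_irrel cells (b - a + 1).toNat a (c - 1) _ _ (by omega) (by omega) (by omega)
      have e2 : pvCalcMinF (b - a + 1).toNat cells (c + 1) b = pvM cells (c + 1) b := by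
        rw [pvM]
        exact pvF_fuel_irrel cells (b - a + 1).toNat (c + 1) b _ _ (by omega) (by omega) (by omega)
      rw [e1, e2, pvG]
    rw [hunf]
    set l := (cells.filter (fun c => decide (c ≥ a ∧ c ≤ b))).map (pvG cells a b) with hldef
    by_cases heq : a = b
    · -- every in-range cell equals a, so every candidate value is 0
      subst heq
      have hall : ∀ t ∈ l, t = 0 := by
        intro t ht
        rw [hldef] at ht
        simp only [List.mem_map, List.mem_filter, decide_eq_true_eq] at ht
        obtain ⟨c, ⟨_, h1, h2⟩, rfl⟩ := ht
        have hca : c = a := le_antisymm h2 h1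
        subst hca
        have e1 : pvM cells c (c - 1) = 0 := by
          apply pvM_empty
          apply List.filter_eq_nil_iff.mpr
          intro x _ hdec
          have := of_decide_eq_true hdec; omega
        have e2 : pvM cells (c + 1) c = 0 := by
          apply pvM_empty
          apply List.filter_eq_nil_iff.mpr
          intro x _ hdec
          have := of_decide_eq_true hdec; omega
        simp [pvG, e1, e2]
      have hsent : ∀ (l' : List Int), (∀ t ∈ l', t = 0) → pvSent l' 0 = 0 := by
        intro l' h
        induction l' with
        | nil => rfl
        | cons u r ih =>
          have hu : u = 0 := h u (by simp)
          subst hu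
          show pvSent r (if (0:Int) = 0 ∨ (0:Int) < 0 then 0 else 0) = 0
          rw [if_pos (Or.inl rfl)]
          exact ih (fun x hx => h x (by simp [hx]))
      rw [hsent l hall]
      cases hm : pvOmin l with
      | none => rfl
      | some x =>
        have hx := (pvOmin_some_iff l x).mp hm
        have : x = 0 := hall x hx.1
        simp [this]
    · have hlt : a < b := lt_of_le_of_ne hab heq
      apply pvSent_min_pos
      intro t ht
      rw [hldef] at ht
      simp only [List.mem_map, List.mem_filter, decide_eq_true_eq] at ht
      obtain ⟨c, ⟨_, h1, h2⟩, rfl⟩ := ht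
      have n1 := pvM_nonneg cells a (c - 1)
      have n2 := pvM_nonneg cells (c + 1) b
      simp only [pvG]; omega

-- ----- fence array -----
def pvFv (c1 c2 : Int) (S : List Int) (m : Int) : Int :=
  PySem.List.pyGetD ((c1 - 1) :: S ++ [c2 + 1]) m 0

theorem pvFv_zero (c1 c2 : Int) (S : List Int) : pvFv c1 c2 S 0 = c1 - 1 := by
  rw [pvFv, PySem.List.pyGetD_ofNat']; rfl

theorem pvFv_last (c1 c2 : Int) (S : List Int) :
    pvFv c1 c2 S ((S.length : Int) + 1) = c2 + 1 := by
  have : ((S.length : Int) + 1) = ((S.length + 1 : Nat) : Int) := by push_cast; ring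
  rw [pvFv, this, PySem.List.pyGetD_natCast]
  rw [List.getD_eq_getElem _ _ (by simp)]
  simp

theorem pvFv_succ_nat (c1 c2 : Int) (S : List Int) (t : Nat) (h : t < S.length) :
    pvFv c1 c2 S ((t : Int) + 1) = S[t] := by
  have : ((t : Int) + 1) = ((t + 1 : Nat) : Int) := by push_cast; ring
  rw [pvFv, this, PySem.List.pyGetD_natCast]
  rw [List.getD_eq_getElem _ _ (by simp; omega)]
  simp [List.getElem_append_left h]

theorem pvF_pairwise (c1 c2 : Int) (S : List Int) (hne : S ≠ [])
    (hpw : S.Pairwise (· < ·)) (hbd : ∀ x ∈ S, c1 ≤ x ∧ x ≤ c2) :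
    ((c1 - 1) :: S ++ [c2 + 1]).Pairwise (· < ·) := by
  obtain ⟨y0, hy0⟩ := List.exists_mem_of_ne_nil S hne
  have hy0' := hbd y0 hy0
  refine List.Pairwise.cons ?_ ?_
  · intro x hx
    rcases List.mem_append.mp hx with h | h
    · have := (hbd x h).1; omega
    · simp at h; omega
  · show List.Pairwise _ (S ++ [c2 + 1])
    rw [List.pairwise_append]
    refine ⟨hpw, by simp, ?_⟩
    intro x hx y hy
    simp at hy; subst hy
    have := (hbd x hx).2; omega

theorem pvFv_lt (c1 c2 : Int) (S : List Int) (hne : S ≠ [])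
    (hpw : S.Pairwise (· < ·)) (hbd : ∀ x ∈ S, c1 ≤ x ∧ x ≤ c2)
    (m m' : Int) (h0 : 0 ≤ m) (hmm : m < m') (hk : m' ≤ (S.length : Int) + 1) :
    pvFv c1 c2 S m < pvFv c1 c2 S m' := by
  have hF := pvF_pairwise c1 c2 S hne hpw hbd
  have hlen : ((c1 - 1) :: S ++ [c2 + 1]).length = S.length + 2 := by simp
  have h1 : m.toNat < S.length + 2 := by omega
  have h2 : m'.toNat < S.length + 2 := by omega
  have e1 : pvFv c1 c2 S m = ((c1 - 1) :: S ++ [c2 + 1])[m.toNat] := by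
    rw [pvFv, PySem.List.pyGetD_of_nonneg _ _ h0, List.getD_eq_getElem _ _ (by omega)]
  have e2 : pvFv c1 c2 S m' = ((c1 - 1) :: S ++ [c2 + 1])[m'.toNat] := by
    rw [pvFv, PySem.List.pyGetD_of_nonneg _ _ (by omega), List.getD_eq_getElem _ _ (by omega)]
  rw [e1, e2]
  exact List.pairwise_iff_getElem.mp hF m.toNat m'.toNat (by omega) (by omega) (by omega)

theorem pvFv_le (c1 c2 : Int) (S : List Int) (hne : S ≠ [])
    (hpw : S.Pairwise (· < ·)) (hbd : ∀ x ∈ S, c1 ≤ x ∧ x ≤ c2)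
    (m m' : Int) (h0 : 0 ≤ m) (hmm : m ≤ m') (hk : m' ≤ (S.length : Int) + 1) :
    pvFv c1 c2 S m ≤ pvFv c1 c2 S m' := by
  rcases eq_or_lt_of_le hmm with rfl | h
  · exact le_rfl
  · exact le_of_lt (pvFv_lt c1 c2 S hne hpw hbd m m' h0 h hk)

theorem pvFv_mem (c1 c2 : Int) (S : List Int) (m : Int)
    (h1 : 1 ≤ m) (h2 : m ≤ (S.length : Int)) : pvFv c1 c2 S m ∈ S := by
  have ht : (m - 1).toNat < S.length := by omega
  have : m = ((m - 1).toNat : Int) + 1 := by omega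
  rw [this, pvFv_succ_nat c1 c2 S _ ht]
  exact List.getElem_mem ht

theorem pvSeg (c1 c2 : Int) (cells S : List Int) (hne : S ≠ [])
    (hpw : S.Pairwise (· < ·)) (hmem : ∀ x, x ∈ S ↔ x ∈ cells ∧ c1 ≤ x ∧ x ≤ c2)
    (p q : Int) (hp : 1 ≤ p) (hpq : p - 1 ≤ q) (hq : q ≤ (S.length : Int)) (x : Int) :
    (∃ m, p ≤ m ∧ m ≤ q ∧ pvFv c1 c2 S m = x)
      ↔ (x ∈ cells ∧ pvFv c1 c2 S (p - 1) + 1 ≤ x ∧ x ≤ pvFv c1 c2 S (q + 1) - 1) := by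
  have hbd : ∀ y ∈ S, c1 ≤ y ∧ y ≤ c2 := fun y hy => ((hmem y).mp hy).2
  constructor
  · rintro ⟨m, hpm, hmq, rfl⟩
    have hmS : pvFv c1 c2 S m ∈ S := pvFv_mem c1 c2 S m (by omega) (by omega)
    refine ⟨((hmem _).mp hmS).1, ?_, ?_⟩
    · have := pvFv_lt c1 c2 S hne hpw hbd (p - 1) m (by omega) (by omega) (by omega)
      omega
    · have := pvFv_lt c1 c2 S hne hpw hbd m (q + 1) (by omega) (by omega) (by omega)
      omega
  · rintro ⟨hxc, hlo, hhi⟩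
    have hc1 : c1 ≤ x := by
      have := pvFv_le c1 c2 S hne hpw hbd 0 (p - 1) le_rfl (by omega) (by omega)
      rw [pvFv_zero] at this; omega
    have hc2 : x ≤ c2 := by
      have := pvFv_le c1 c2 S hne hpw hbd (q + 1) ((S.length : Int) + 1) (by omega) (by omega) le_rfl
      rw [pvFv_last] at this; omega
    have hxS : x ∈ S := (hmem x).mpr ⟨hxc, hc1, hc2⟩
    obtain ⟨t, ht, rfl⟩ := List.getElem_of_mem hxS
    refine ⟨(t : Int) + 1, ?_, ?_, pvFv_succ_nat c1 c2 S t ht⟩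
    · by_contra hcon
      have hm1 : (t : Int) + 1 ≤ p - 1 := by omega
      have := pvFv_le c1 c2 S hne hpw hbd ((t : Int) + 1) (p - 1) (by omega) hm1 (by omega)
      rw [pvFv_succ_nat c1 c2 S t ht] at this; omega
    · by_contra hcon
      have hm1 : q + 1 ≤ (t : Int) + 1 := by omega
      have := pvFv_le c1 c2 S hne hpw hbd (q + 1) ((t : Int) + 1) (by omega) hm1 (by omega)
      rw [pvFv_succ_nat c1 c2 S t ht] at this; omega

-- ----- generic fold-with-invariant over range(a, b) -----
theorem pvFoldl_inv {α : Type} (f : α → Int → α) (P : α → Int → Prop) (a b : Int) (init : α)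
    (hab : a ≤ b) (h0 : P init a)
    (hstep : ∀ d x, a ≤ x → x < b → P d x → P (f d x) (x + 1)) :
    P ((PySem.List.pyRange a b 1).foldl f init) b := by
  generalize hn : (b - a).toNat = n
  induction n generalizing b with
  | zero =>
    have hba : b = a := by omega
    subst hba
    rw [PySem.List.pyRange_one_eq_nil le_rfl]
    exact h0
  | succ n ih =>
    have hb : b = (b - 1) + 1 := by omega
    rw [hb, PySem.List.pyRange_one_succ_right (by omega), List.foldl_append]
    simp only [List.foldl_cons, List.foldl_nil]
    exact hstep _ (b - 1) (by omega) (by omega)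
      (ih (b - 1) (by omega) (fun d x hx hxb hP => hstep d x hx (by omega) hP) (by omega))
-- ----- the DP-table invariant -----
def pvInv (c1 c2 : Int) (cells S : List Int) (d : PySem.Dict (Int × Int) Int) (L : Int) : Prop :=
  ∀ p q : Int, 1 ≤ p → p - 1 ≤ q → q ≤ (S.length : Int) → q - p + 1 ≤ L →
    d.getD (p, q) 0
      = pvM cells (pvFv c1 c2 S (p - 1) + 1) (pvFv c1 c2 S (q + 1) - 1)

theorem pvGap (c1 c2 : Int) (cells S : List Int) (hne : S ≠ [])
    (hpw : S.Pairwise (· < ·)) (hmem : ∀ x, x ∈ S ↔ x ∈ cells ∧ c1 ≤ x ∧ x ≤ c2)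
    (p : Int) (hp : 1 ≤ p) (hpk : p - 1 ≤ (S.length : Int)) :
    pvM cells (pvFv c1 c2 S (p - 1) + 1) (pvFv c1 c2 S (p - 1 + 1) - 1) = 0 := by
  rw [pvMchar]
  have hfil : cells.filter
      (fun c => decide (c ≥ pvFv c1 c2 S (p - 1) + 1 ∧ c ≤ pvFv c1 c2 S (p - 1 + 1) - 1)) = [] := by
    apply List.filter_eq_nil_iff.mpr
    intro x hx hdec
    have hd := of_decide_eq_true hdec
    have hseg := (pvSeg c1 c2 cells S hne hpw hmem p (p - 1) hp (by omega) hpk x).mpr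
      ⟨hx, by omega, by omega⟩
    obtain ⟨m, hm1, hm2, _⟩ := hseg
    omega
  rw [hfil]
  rfl

theorem pvCell (c1 c2 : Int) (cells S : List Int) (hne : S ≠ [])
    (hpw : S.Pairwise (· < ·)) (hmem : ∀ x, x ∈ S ↔ x ∈ cells ∧ c1 ≤ x ∧ x ≤ c2)
    (d : PySem.Dict (Int × Int) Int) (L i : Int)
    (h1 : 1 ≤ L) (h2 : L ≤ (S.length : Int)) (h3 : 1 ≤ i) (h4 : i ≤ (S.length : Int) - L + 1)
    (hInv : pvInv c1 c2 cells S d (L - 1)) :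
    ((PySem.List.pyRange i (i + L - 1 + 1) 1).foldl (fun best m =>
        pvStep best (pvFv c1 c2 S (i + L - 1 + 1) - pvFv c1 c2 S (i - 1) - 2
          + d.getD (i, m - 1) 0 + d.getD (m + 1, i + L - 1) 0)) none).getD 0
      = pvM cells (pvFv c1 c2 S (i - 1) + 1) (pvFv c1 c2 S (i + L - 1 + 1) - 1) := by
  rw [← List.foldl_map]
  show (pvOmin _).getD 0 = _
  set a := pvFv c1 c2 S (i - 1) + 1 with ha
  set b := pvFv c1 c2 S (i + L - 1 + 1) - 1 with hb
  have hcongr : (PySem.List.pyRange i (i + L - 1 + 1)).map (fun m =>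
        pvFv c1 c2 S (i + L - 1 + 1) - pvFv c1 c2 S (i - 1) - 2
          + d.getD (i, m - 1) 0 + d.getD (m + 1, i + L - 1) 0)
      = (PySem.List.pyRange i (i + L - 1 + 1)).map (fun m => pvG cells a b (pvFv c1 c2 S m)) := by
    apply List.map_congr_left
    intro m hm
    have hm' := PySem.List.mem_pyRange_one.mp hm
    have e1 : d.getD (i, m - 1) 0
        = pvM cells (pvFv c1 c2 S (i - 1) + 1) (pvFv c1 c2 S (m - 1 + 1) - 1) :=
      hInv i (m - 1) (by omega) (by omega) (by omega) (by omega)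
    have e2 : d.getD (m + 1, i + L - 1) 0
        = pvM cells (pvFv c1 c2 S (m + 1 - 1) + 1) (pvFv c1 c2 S (i + L - 1 + 1) - 1) :=
      hInv (m + 1) (i + L - 1) (by omega) (by omega) (by omega) (by omega)
    have em1 : m - 1 + 1 = m := by ring
    have em2 : m + 1 - 1 = m := by ring
    rw [em1] at e1
    rw [em2] at e2
    rw [e1, e2, pvG, ha, hb]
    omega
  rw [hcongr]
  have hmemeq : ∀ x, x ∈ (PySem.List.pyRange i (i + L - 1 + 1)).map (fun m => pvG cells a b (pvFv c1 c2 S m))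
      ↔ x ∈ (cells.filter (fun c => decide (c ≥ a ∧ c ≤ b))).map (pvG cells a b) := by
    intro x
    simp only [List.mem_map, List.mem_filter, decide_eq_true_eq]
    constructor
    · rintro ⟨m, hm, rfl⟩
      have hm' := PySem.List.mem_pyRange_one.mp hm
      obtain ⟨hc, hlo, hhi⟩ := (pvSeg c1 c2 cells S hne hpw hmem i (i + L - 1) h3 (by omega)
        (by omega) (pvFv c1 c2 S m)).mp ⟨m, by omega, by omega, rfl⟩
      exact ⟨pvFv c1 c2 S m, ⟨hc, by omega, by omega⟩, rfl⟩
    · rintro ⟨c, ⟨hc, hlo, hhi⟩, rfl⟩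
      obtain ⟨m, hm1, hm2, rfl⟩ := (pvSeg c1 c2 cells S hne hpw hmem i (i + L - 1) h3 (by omega)
        (by omega) c).mpr ⟨hc, by omega, by omega⟩
      exact ⟨m, PySem.List.mem_pyRange_one.mpr (by omega), rfl⟩
  rw [pvOmin_congr _ _ hmemeq, ← pvMchar]
theorem pvLayer (c1 c2 : Int) (cells S : List Int) (hne : S ≠ [])
    (hpw : S.Pairwise (· < ·)) (hmem : ∀ x, x ∈ S ↔ x ∈ cells ∧ c1 ≤ x ∧ x ≤ c2)
    (d : PySem.Dict (Int × Int) Int) (L : Int)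
    (h1 : 1 ≤ L) (h2 : L ≤ (S.length : Int)) (hInv : pvInv c1 c2 cells S d (L - 1)) :
    pvInv c1 c2 cells S
      ((PySem.List.pyRange 1 ((S.length : Int) - L + 2) 1).foldl (fun dp i =>
        dp.insert (i, i + L - 1)
          (((PySem.List.pyRange i (i + L - 1 + 1) 1).foldl (fun best m =>
              pvStep best (pvFv c1 c2 S (i + L - 1 + 1) - pvFv c1 c2 S (i - 1) - 2
                + dp.getD (i, m - 1) 0 + dp.getD (m + 1, i + L - 1) 0)) none).getD 0)) d)
      L := by
  have key := pvFoldl_inv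
    (f := fun dp i =>
        dp.insert (i, i + L - 1)
          (((PySem.List.pyRange i (i + L - 1 + 1) 1).foldl (fun best m =>
              pvStep best (pvFv c1 c2 S (i + L - 1 + 1) - pvFv c1 c2 S (i - 1) - 2
                + dp.getD (i, m - 1) 0 + dp.getD (m + 1, i + L - 1) 0)) none).getD 0))
    (P := fun dp i0 => pvInv c1 c2 cells S dp (L - 1) ∧
      ∀ p, 1 ≤ p → p < i0 → dp.getD (p, p + L - 1) 0
        = pvM cells (pvFv c1 c2 S (p - 1) + 1) (pvFv c1 c2 S (p + L - 1 + 1) - 1))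
    1 ((S.length : Int) - L + 2) d (by omega) ⟨hInv, by omega⟩ ?_
  · obtain ⟨hI, hDone⟩ := key
    intro p q hp hpq hq hL
    by_cases hcase : q - p + 1 ≤ L - 1
    · exact hI p q hp hpq hq hcase
    · have hq' : q = p + L - 1 := by omega
      subst hq'
      exact hDone p hp (by omega)
  · rintro dp i hi1 hi2 ⟨hI, hDone⟩
    refine ⟨?_, ?_⟩
    · intro p q hp hpq hq hL
      rw [PySem.Dict.getD_insert]
      split_ifs with hk
      · exfalso
        have h1' := (Prod.mk.injEq _ _ _ _).mp hk
        omega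
      · exact hI p q hp hpq hq hL
    · intro p hp hpi
      by_cases hpe : p = i
      · subst hpe
        rw [PySem.Dict.getD_insert, if_pos rfl]
        exact pvCell c1 c2 cells S hne hpw hmem dp L p h1 h2 hp (by omega) hI
      · rw [PySem.Dict.getD_insert]
        rw [if_neg (by simp only [Prod.mk.injEq]; omega)]
        exact hDone p hp (by omega)
theorem pvTable (c1 c2 : Int) (cells S : List Int)
    (hpw : S.Pairwise (· < ·)) (hmem : ∀ x, x ∈ S ↔ x ∈ cells ∧ c1 ≤ x ∧ x ≤ c2) :
    ((PySem.List.pyRange 1 ((S.length : Int) + 1) 1).foldl (fun dp length =>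
      (PySem.List.pyRange 1 ((S.length : Int) - length + 2) 1).foldl (fun dp i =>
        dp.insert (i, i + length - 1)
          (((PySem.List.pyRange i (i + length - 1 + 1) 1).foldl (fun best m =>
              pvStep best (pvFv c1 c2 S (i + length - 1 + 1) - pvFv c1 c2 S (i - 1) - 2
                + dp.getD (i, m - 1) 0 + dp.getD (m + 1, i + length - 1) 0)) none).getD 0)) dp)
      PySem.Dict.empty).getD (1, (S.length : Int)) 0
    = pvM cells c1 c2 := by
  by_cases hne : S = []
  · subst hne
    simp only [List.length_nil, Nat.cast_zero]
    rw [PySem.List.pyRange_one_eq_nil (by omega)]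
    simp only [List.foldl_nil, PySem.Dict.getD_empty]
    have hfil : cells.filter (fun c => decide (c ≥ c1 ∧ c ≤ c2)) = [] := by
      apply List.filter_eq_nil_iff.mpr
      intro x hx hdec
      have hd := of_decide_eq_true hdec
      have : x ∈ ([] : List Int) := (hmem x).mpr ⟨hx, by omega, by omega⟩
      simp at this
    rw [pvMchar, hfil]
    rfl
  · have houter := pvFoldl_inv
      (f := fun dp length =>
        (PySem.List.pyRange 1 ((S.length : Int) - length + 2) 1).foldl (fun dp i =>
          dp.insert (i, i + length - 1)
            (((PySem.List.pyRange i (i + length - 1 + 1) 1).foldl (fun best m =>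
                pvStep best (pvFv c1 c2 S (i + length - 1 + 1) - pvFv c1 c2 S (i - 1) - 2
                  + dp.getD (i, m - 1) 0 + dp.getD (m + 1, i + length - 1) 0)) none).getD 0)) dp)
      (P := fun d x => pvInv c1 c2 cells S d (x - 1))
      1 ((S.length : Int) + 1) PySem.Dict.empty (by omega) ?_ ?_
    · beta_reduce at houter
      have hxx : (S.length : Int) + 1 - 1 = (S.length : Int) := by ring
      rw [hxx] at houter
      have hfin := houter 1 (S.length : Int) (by omega) (by omega) le_rfl (by omega)
      rw [hfin]
      have e0 : (1 : Int) - 1 = 0 := by ring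
      rw [e0, pvFv_zero, pvFv_last]
      have e1 : c1 - 1 + 1 = c1 := by ring
      have e2 : c2 + 1 - 1 = c2 := by ring
      rw [e1, e2]
    · intro p q hp hpq hq hL
      have : q = p - 1 := by omega
      subst this
      rw [PySem.Dict.getD_empty]
      exact (pvGap c1 c2 cells S hne hpw hmem p hp (by omega)).symm
    · intro d x hx1 hx2 hP
      show pvInv c1 c2 cells S _ (x + 1 - 1)
      have hxx : x + 1 - 1 = x := by ring
      rw [hxx]
      exact pvLayer c1 c2 cells S hne hpw hmem d x (by omega) (by omega) hP

theorem pvMain (c1 c2 : Int) (cells : List Int) :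
    get_min_costs_between_cells_alt c1 c2 cells = pvM cells c1 c2 := by
  have hpw : (PySem.List.sorted (PySem.Set.ofList (cells.filter (fun c => decide (c1 ≤ c ∧ c ≤ c2)))) (fun x => x) false).Pairwise (· < ·) :=
    PySem.List.sorted_ofList_pairwise_lt _
  have hmem : ∀ x, x ∈ PySem.List.sorted (PySem.Set.ofList (cells.filter (fun c => decide (c1 ≤ c ∧ c ≤ c2)))) (fun x => x) false ↔ x ∈ cells ∧ c1 ≤ x ∧ x ≤ c2 := by
    intro x
    rw [PySem.List.mem_sorted, PySem.Set.mem_ofList, List.mem_filter]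
    simp
  exact pvTable c1 c2 cells _ hpw hmem

-- ===== VERDICT (by name: the statement is the Claim_ definition above) =====
theorem get_min_costs_between_cells_spec : Claim_equal_get_min_costs_between_cells := by
  intro c1 c2 cells _
  show get_min_costs_between_cells c1 c2 cells = get_min_costs_between_cells_alt c1 c2 cells
  rw [get_min_costs_between_cells, pvMain, pvM]
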